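-- pv_equiv track=rewrite | github.com/khankhalil3388-stack/AiLessonStudio | AiLessonStudio/src/textbook/processor.py | _combine_extracted_texts
-- ===== SOURCE A (Python) =====
-- from typing import Dict, List, Any, Optional, Tuple
--
-- def _combine_extracted_texts(extracted_texts: List[Tuple[int, str, str]]) -> str:
--     """Combine and deduplicate texts from multiple extractors"""
--     # Group by page
--     page_texts = {}
--     for page_num, text, source in extracted_texts:
--         if page_num not in page_texts:
--             page_texts[page_num] = []
--         page_texts[page_num].append(text)
--
--     # For each page, choose the best text
--     combined_pages = []
--     for page_num in sorted(page_texts.keys()):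
--         texts = page_texts[page_num]
--         if texts:
--             # Choose the longest non-empty text
--             valid_texts = [t for t in texts if t.strip()]
--             if valid_texts:
--                 best_text = max(valid_texts, key=len)
--                 combined_pages.append(f"--- Page {page_num + 1} ---\n{best_text}")
--
--     return "\n\n".join(combined_pages)
-- ===== SOURCE B (Python) =====
-- from typing import Dict, List, Any, Optional, Tuple
--
-- def _combine_extracted_texts(extracted_texts: List[Tuple[int, str, str]]) -> str:
--     """Combine and deduplicate texts from multiple extractors (single-pass best-per-page)."""
--     best = {}
--     for page_num, text, source in extracted_texts:
--         if not text.strip():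
--             continue
--         cur = best.get(page_num)
--         if cur is None or len(text) > len(cur):
--             best[page_num] = text
--     return "\n\n".join(
--         f"--- Page {page_num + 1} ---\n{best[page_num]}"
--         for page_num in sorted(best)
--     )
-- ===== Notes on version B (the rewrite author's own statement) =====
-- stated objective: simpler
-- what changed: Replaces group-into-lists-per-page followed by a per-page filter+max pass with a single fused pass that keeps only the best-so-far non-empty text per page (strict > preserves max's first-max tie-break), then renders sorted(best).
import Mathlib
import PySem

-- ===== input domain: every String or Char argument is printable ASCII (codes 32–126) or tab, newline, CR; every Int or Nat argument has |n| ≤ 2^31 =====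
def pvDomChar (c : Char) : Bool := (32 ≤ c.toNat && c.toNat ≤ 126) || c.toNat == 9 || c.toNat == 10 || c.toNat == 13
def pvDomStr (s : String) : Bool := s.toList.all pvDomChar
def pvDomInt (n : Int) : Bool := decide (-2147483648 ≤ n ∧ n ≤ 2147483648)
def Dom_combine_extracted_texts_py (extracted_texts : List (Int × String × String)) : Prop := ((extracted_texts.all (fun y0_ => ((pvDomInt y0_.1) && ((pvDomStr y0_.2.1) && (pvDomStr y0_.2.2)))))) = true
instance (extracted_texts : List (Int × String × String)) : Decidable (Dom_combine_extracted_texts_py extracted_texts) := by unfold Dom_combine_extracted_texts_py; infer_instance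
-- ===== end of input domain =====

-- B fuses A's group-into-lists-then-filter+max passes into one best-so-far pass per page; objective: simpler (same asymptotic cost).

-- shared formatting helper: f"--- Page {page_num + 1} ---\n{text}"
def pvPage (k : Int) (t : String) : String :=
  PySem.Str.join "" ["--- Page ", PySem.Int.toStr (k + 1), " ---\n", t]

-- ===== PORT A =====
def combine_extracted_texts_py (extracted_texts : List (Int × String × String)) : String :=
  -- page_texts = {}; for page_num, text, source in …: if page_num not in page_texts: page_texts[page_num] = []; append
  let page_texts : PySem.Dict Int (List String) :=
    extracted_texts.foldl (fun d p =>
      (if d.contains p.1 then d else d.insert p.1 []).modify p.1 [] (fun l => l ++ [p.2.1]))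
      PySem.Dict.empty
  -- for page_num in sorted(page_texts.keys()): …
  let combined_pages : List String :=
    (PySem.List.sorted page_texts.keys (fun k => k) false).foldl
      (fun acc page_num =>
        let texts := page_texts.getD page_num []
        if texts ≠ [] then
          let valid_texts := texts.filter (fun t => PySem.Str.strip t != "")
          match PySem.List.max? valid_texts (fun t => PySem.Str.len t) with
          | some best_text => acc ++ [pvPage page_num best_text]
          | none => acc
        else acc) []
  PySem.Str.join "\n\n" combined_pages

-- ===== PORT B =====
def combine_extracted_texts_py_alt (extracted_texts : List (Int × String × String)) : String :=
  -- best = {}; one pass: skip blank texts, keep the strictly longer text per page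
  let best : PySem.Dict Int String :=
    extracted_texts.foldl (fun d p =>
      if PySem.Str.strip p.2.1 == "" then d
      else
        match d.get? p.1 with
        | none => d.insert p.1 p.2.1
        | some cur => if PySem.Str.len cur < PySem.Str.len p.2.1 then d.insert p.1 p.2.1 else d)
      PySem.Dict.empty
  PySem.Str.join "\n\n"
    ((PySem.List.sorted best.keys (fun k => k) false).map
      (fun k => pvPage k (best.getD k "")))

-- ===== PRECONDITION & SPEC =====
def Spec_combine_extracted_texts_py (extracted_texts : List (Int × String × String)) (out : String) : Prop := out = combine_extracted_texts_py_alt extracted_texts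
instance (extracted_texts : List (Int × String × String)) (out : String) : Decidable (Spec_combine_extracted_texts_py extracted_texts out) := by unfold Spec_combine_extracted_texts_py; infer_instance

-- ===== CLAIM (what is proved, stated in full; the proofs are below) =====
def Claim_equal_combine_extracted_texts_py : Prop := ∀ (extracted_texts : List (Int × String × String)), Dom_combine_extracted_texts_py extracted_texts → Spec_combine_extracted_texts_py extracted_texts (combine_extracted_texts_py extracted_texts)

-- ===== LEMMAS AND PROOFS =====

-- all texts recorded for page k, in input order
def pvTexts (k : Int) (xs : List (Int × String × String)) : List String :=
  (xs.filter (fun p => p.1 == k)).map (fun p => p.2.1)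

-- the non-blank ones among them
def pvValid (k : Int) (xs : List (Int × String × String)) : List String :=
  (pvTexts k xs).filter (fun t => PySem.Str.strip t != "")

-- B's best-so-far step / run over the valid texts of one page (same fold as max?(key=len))
def pvStep (cur : Option String) (t : String) : Option String :=
  match cur with
  | none => some t
  | some c => if PySem.Str.len c < PySem.Str.len t then some t else some c

def pvRun (cur : Option String) (l : List String) : Option String := l.foldl pvStep cur

-- A's contribution for one sorted key
def pvG (xs : List (Int × String × String)) (k : Int) : Option String :=
  (PySem.List.max? (pvValid k xs) (fun t => PySem.Str.len t)).map (pvPage k)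

lemma pvTexts_cons (p : Int × String × String) (ps : List (Int × String × String)) (k : Int) :
    pvTexts k (p :: ps) = if p.1 == k then p.2.1 :: pvTexts k ps else pvTexts k ps := by
  by_cases h : p.1 == k <;> simp [pvTexts, h]

-- A's grouping step is a plain modify
lemma pvA_step (d : PySem.Dict Int (List String)) (p : Int × String × String) :
    (if d.contains p.1 then d else d.insert p.1 []).modify p.1 [] (fun l => l ++ [p.2.1])
      = d.modify p.1 [] (fun l => l ++ [p.2.1]) := by
  by_cases h : d.contains p.1
  · simp [h]
  · have hget : d.get? p.1 = none := by
      cases hg : d.get? p.1 with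
      | none => rfl
      | some v => exact absurd (by rw [PySem.Dict.contains_eq_isSome_get?, hg]; rfl) h
    simp [h, PySem.Dict.modify, PySem.Dict.getD_eq_get?_getD, PySem.Dict.get?_insert_self,
      PySem.Dict.insert_insert_self, hget]

lemma pvA_dict_getD (xs : List (Int × String × String)) :
    ∀ (d : PySem.Dict Int (List String)) (k : Int),
    (xs.foldl (fun d p => d.modify p.1 [] (fun l => l ++ [p.2.1])) d).getD k []
      = d.getD k [] ++ pvTexts k xs := by
  induction xs with
  | nil => intro d k; simp [pvTexts]
  | cons p ps ih =>
    intro d k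
    simp only [List.foldl_cons]
    rw [ih, pvTexts_cons, PySem.Dict.getD_modify]
    by_cases h : p.1 = k
    · subst h
      simp
    · have h' : (p.1 == k) = false := by simpa using h
      simp [h', Ne.symm h]

-- the B dictionary's lookup is the best-so-far run over the valid texts for that page
lemma pvB_dict_get? (xs : List (Int × String × String)) :
    ∀ (d : PySem.Dict Int String) (k : Int),
    (xs.foldl (fun d p =>
      if PySem.Str.strip p.2.1 == "" then d
      else
        match d.get? p.1 with
        | none => d.insert p.1 p.2.1
        | some cur => if PySem.Str.len cur < PySem.Str.len p.2.1 then d.insert p.1 p.2.1 else d)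
      d).get? k = pvRun (d.get? k) (pvValid k xs) := by
  induction xs with
  | nil => intro d k; simp [pvValid, pvTexts, pvRun]
  | cons p ps ih =>
    intro d k
    simp only [List.foldl_cons]
    by_cases hb : (PySem.Str.strip p.2.1 == "") = true
    · have hv : pvValid k (p :: ps) = pvValid k ps := by
        rw [pvValid, pvTexts_cons]
        by_cases hk : p.1 == k <;> simp [hk, pvValid, bne, hb]
      rw [if_pos hb, ih, hv]
    · have hb' : (PySem.Str.strip p.2.1 == "") = false := by simpa using hb
      rw [if_neg hb]
      by_cases hk : p.1 = k
      · subst hk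
        have hv : pvValid p.1 (p :: ps) = p.2.1 :: pvValid p.1 ps := by
          rw [pvValid, pvTexts_cons]
          simp [pvValid, bne, hb']
        rw [hv]
        have hrun : pvRun (d.get? p.1) (p.2.1 :: pvValid p.1 ps)
            = pvRun (pvStep (d.get? p.1) p.2.1) (pvValid p.1 ps) := rfl
        rw [hrun]
        cases hc : d.get? p.1 with
        | none =>
          rw [ih, PySem.Dict.get?_insert_self]
          rfl
        | some cur =>
          rw [show (match some cur with
              | none => d.insert p.1 p.2.1
              | some cur => if PySem.Str.len cur < PySem.Str.len p.2.1 then d.insert p.1 p.2.1 else d)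
            = if PySem.Str.len cur < PySem.Str.len p.2.1 then d.insert p.1 p.2.1 else d from rfl]
          by_cases hlt : PySem.Str.len cur < PySem.Str.len p.2.1
          · rw [if_pos hlt, ih, PySem.Dict.get?_insert_self,
              show pvStep (some cur) p.2.1
                = if PySem.Str.len cur < PySem.Str.len p.2.1 then some p.2.1 else some cur from rfl,
              if_pos hlt]
          · rw [if_neg hlt, ih, hc,
              show pvStep (some cur) p.2.1
                = if PySem.Str.len cur < PySem.Str.len p.2.1 then some p.2.1 else some cur from rfl,
              if_neg hlt]
      · have hv : pvValid k (p :: ps) = pvValid k ps := by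
          rw [pvValid, pvTexts_cons]
          have hk' : (p.1 == k) = false := by simpa using hk
          simp [hk', pvValid]
        rw [hv]
        cases hc : d.get? p.1 with
        | none =>
          rw [ih, PySem.Dict.get?_insert_of_ne _ _ (Ne.symm hk)]
        | some cur =>
          rw [show (match some cur with
              | none => d.insert p.1 p.2.1
              | some cur => if PySem.Str.len cur < PySem.Str.len p.2.1 then d.insert p.1 p.2.1 else d)
            = if PySem.Str.len cur < PySem.Str.len p.2.1 then d.insert p.1 p.2.1 else d from rfl]
          by_cases hlt : PySem.Str.len cur < PySem.Str.len p.2.1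
          · rw [if_pos hlt, ih, PySem.Dict.get?_insert_of_ne _ _ (Ne.symm hk)]
          · rw [if_neg hlt, ih]

lemma pvB_dict_nodup (xs : List (Int × String × String)) :
    ∀ (d : PySem.Dict Int String), d.keys.Nodup →
    (xs.foldl (fun d p =>
      if PySem.Str.strip p.2.1 == "" then d
      else
        match d.get? p.1 with
        | none => d.insert p.1 p.2.1
        | some cur => if PySem.Str.len cur < PySem.Str.len p.2.1 then d.insert p.1 p.2.1 else d)
      d).keys.Nodup := by
  induction xs with
  | nil => intro d hd; simpa using hd
  | cons p ps ih =>
    intro d hd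
    simp only [List.foldl_cons]
    by_cases hb : (PySem.Str.strip p.2.1 == "") = true
    · rw [if_pos hb]; exact ih d hd
    · rw [if_neg hb]
      cases hc : d.get? p.1 with
      | none => exact ih _ (PySem.Dict.nodup_keys_insert _ _ _ hd)
      | some cur =>
        rw [show (match some cur with
            | none => d.insert p.1 p.2.1
            | some cur => if PySem.Str.len cur < PySem.Str.len p.2.1 then d.insert p.1 p.2.1 else d)
          = if PySem.Str.len cur < PySem.Str.len p.2.1 then d.insert p.1 p.2.1 else d from rfl]
        by_cases hlt : PySem.Str.len cur < PySem.Str.len p.2.1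
        · rw [if_pos hlt]; exact ih _ (PySem.Dict.nodup_keys_insert _ _ _ hd)
        · rw [if_neg hlt]; exact ih d hd

-- pvRun never forgets a some
lemma pvRun_some (l : List String) : ∀ c, ∃ c', pvRun (some c) l = some c' := by
  induction l with
  | nil => intro c; exact ⟨c, rfl⟩
  | cons t ts ih =>
    intro c
    show ∃ c', pvRun (pvStep (some c) t) ts = some c'
    rw [show pvStep (some c) t
      = if PySem.Str.len c < PySem.Str.len t then some t else some c from rfl]
    by_cases h : PySem.Str.len c < PySem.Str.len t
    · rw [if_pos h]; exact ih t
    · rw [if_neg h]; exact ih c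

lemma pvRun_none_eq_none_iff (l : List String) : pvRun none l = none ↔ l = [] := by
  cases l with
  | nil => simp [pvRun]
  | cons t ts =>
    have : pvRun none (t :: ts) = pvRun (some t) ts := rfl
    obtain ⟨c', hc'⟩ := pvRun_some ts t
    simp [this, hc']

-- max?(…, key=len) IS the best-so-far fold
lemma pvMax_eq_run (l : List String) :
    PySem.List.max? l (fun t => PySem.Str.len t) = pvRun none l := by
  unfold PySem.List.max? pvRun
  exact PySem.List.foldl_congr_mem _ _ _ _ (by intro acc x _; cases acc <;> rfl)

-- a valid text for page k means page k occurs in the input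
lemma pvValid_ne_nil_mem (k : Int) (xs : List (Int × String × String)) :
    pvValid k xs ≠ [] → k ∈ xs.map (fun p => p.1) := by
  intro h
  rcases List.exists_mem_of_ne_nil _ h with ⟨t, ht⟩
  have ht' := List.mem_of_mem_filter ht
  rcases List.mem_map.mp ht' with ⟨p, hp, _⟩
  exact List.mem_map.mpr ⟨p, List.mem_of_mem_filter hp, by
    have := (List.mem_filter.mp hp).2; simpa using this⟩

-- flatMap over option-toList is filterMap
lemma pvFlatMap_toList {α β : Type} (g : α → Option β) (l : List α) :
    l.flatMap (fun k => (g k).toList) = l.filterMap g := by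
  induction l with
  | nil => simp
  | cons x xs ih => cases h : g x <;> simp [h, ih]

lemma pvFilterMap_if {α β : Type} (p : α → Bool) (h : α → β) (g : α → Option β)
    (hg : ∀ k, g k = if p k then some (h k) else none) (l : List α) :
    l.filterMap g = (l.filter p).map h := by
  induction l with
  | nil => simp
  | cons x xs ih =>
    simp only [List.filterMap_cons, List.filter_cons, hg x]
    by_cases hx : p x <;> simp [hx, ih]

-- ===== VERDICT (by name: the statement is the Claim_ definition above) =====
theorem combine_extracted_texts_py_spec : Claim_equal_combine_extracted_texts_py := by
  intro xs _
  unfold Spec_combine_extracted_texts_py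
  simp only [combine_extracted_texts_py, combine_extracted_texts_py_alt]
  rw [show (fun (d : PySem.Dict Int (List String)) (p : Int × String × String) =>
      (if d.contains p.1 then d else d.insert p.1 []).modify p.1 [] (fun l => l ++ [p.2.1]))
    = fun d p => d.modify p.1 [] (fun l => l ++ [p.2.1]) from
      funext fun d => funext fun p => pvA_step d p]
  set Ad := xs.foldl (fun (d : PySem.Dict Int (List String)) p =>
      d.modify p.1 [] (fun l => l ++ [p.2.1])) PySem.Dict.empty with hAd
  set Bd := xs.foldl (fun (d : PySem.Dict Int String) p =>
      if PySem.Str.strip p.2.1 == "" then d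
      else
        match d.get? p.1 with
        | none => d.insert p.1 p.2.1
        | some cur => if PySem.Str.len cur < PySem.Str.len p.2.1 then d.insert p.1 p.2.1 else d)
      PySem.Dict.empty with hBd
  have hA_getD : ∀ k, Ad.getD k [] = pvTexts k xs := by
    intro k; rw [hAd, pvA_dict_getD]; simp
  have hA_keys : Ad.keys = PySem.Set.ofList (xs.map (fun p => p.1)) := by
    rw [hAd, PySem.Dict.keys_foldl_modify_key xs (fun p => p.1) [] (fun _ p => fun l => l ++ [p.2.1])]
    simp [PySem.Set.update_nil_left]
  have hB_get : ∀ k, Bd.get? k = pvRun none (pvValid k xs) := by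
    intro k; rw [hBd, pvB_dict_get?]; simp
  have hB_nodup : Bd.keys.Nodup := by
    rw [hBd]; exact pvB_dict_nodup xs PySem.Dict.empty (by simp)
  -- A's output loop over the sorted keys is a filterMap
  have hloop : (PySem.List.sorted Ad.keys (fun k => k) false).foldl
      (fun acc page_num =>
        if Ad.getD page_num [] ≠ [] then
          match PySem.List.max? ((Ad.getD page_num []).filter (fun t => PySem.Str.strip t != ""))
              (fun t => PySem.Str.len t) with
          | some best_text => acc ++ [pvPage page_num best_text]
          | none => acc
        else acc) []
      = (PySem.List.sorted Ad.keys (fun k => k) false).filterMap (pvG xs) := by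
    rw [PySem.List.foldl_congr_mem _ _
        (fun acc k => acc ++ (pvG xs k).toList) _ ?_]
    · rw [PySem.List.foldl_append_eq_flatMap, pvFlatMap_toList]
      simp
    · intro acc k _
      rw [hA_getD k]
      have hvv : (pvTexts k xs).filter (fun t => PySem.Str.strip t != "") = pvValid k xs := rfl
      rw [hvv]
      show (if pvTexts k xs ≠ [] then
          match PySem.List.max? (pvValid k xs) (fun t => PySem.Str.len t) with
          | some best_text => acc ++ [pvPage k best_text]
          | none => acc
        else acc)
        = acc ++ ((PySem.List.max? (pvValid k xs) (fun t => PySem.Str.len t)).map (pvPage k)).toList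
      by_cases ht : pvTexts k xs = []
      · have hv : pvValid k xs = [] := by rw [pvValid, ht]; rfl
        simp [ht, hv, PySem.List.max?]
      · rw [if_pos ht]
        cases hm : PySem.List.max? (pvValid k xs) (fun t => PySem.Str.len t) <;> simp
  rw [hloop]
  -- the key lists coincide
  have hSA_lt : (PySem.List.sorted Ad.keys (fun k => k) false).Pairwise (· < ·) := by
    rw [hA_keys]; exact PySem.List.sorted_ofList_pairwise_lt _
  have hSA_nodup : (PySem.List.sorted Ad.keys (fun k => k) false).Nodup :=
    hSA_lt.imp (fun h => ne_of_lt h)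
  have hP : ∀ k, pvG xs k
      = if !(pvValid k xs).isEmpty then some (pvPage k (Bd.getD k "")) else none := by
    intro k
    cases e : pvValid k xs with
    | nil => simp [pvG, e, PySem.List.max?]
    | cons t ts =>
      have hrun : pvRun none (t :: ts) = pvRun (some t) ts := rfl
      obtain ⟨c', hc'⟩ := pvRun_some ts t
      have hmax : PySem.List.max? (pvValid k xs) (fun t => PySem.Str.len t) = some c' := by
        rw [pvMax_eq_run, e, hrun, hc']
      have hbd : Bd.getD k "" = c' := by
        rw [PySem.Dict.getD_eq_get?_getD, hB_get k, e, hrun, hc']; rfl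
      rw [show pvG xs k
          = (PySem.List.max? (pvValid k xs) (fun t => PySem.Str.len t)).map (pvPage k) from rfl,
        hmax, hbd]
      simp
  rw [pvFilterMap_if (fun k => !(pvValid k xs).isEmpty) (fun k => pvPage k (Bd.getD k "")) _ hP]
  have hSB : PySem.List.sorted Bd.keys (fun k => k) false
      = (PySem.List.sorted Ad.keys (fun k => k) false).filter (fun k => !(pvValid k xs).isEmpty) := by
    apply PySem.List.sorted_eq_of_perm_of_pairwise_lt
    · rw [List.perm_ext_iff_of_nodup (hSA_nodup.filter _) hB_nodup]
      intro a
      constructor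
      · intro ha
        have hmem := List.mem_of_mem_filter ha
        have hpa : (pvValid a xs).isEmpty = false := by
          have := (List.mem_filter.mp ha).2; simpa using this
        have hne : pvValid a xs ≠ [] := by
          intro hnil; rw [hnil] at hpa; simp at hpa
        have : Bd.get? a ≠ none := by
          rw [hB_get a]; intro hn; exact hne ((pvRun_none_eq_none_iff _).mp hn)
        by_contra hnk
        exact this ((PySem.Dict.get?_eq_none_iff_not_mem_keys Bd a).mpr hnk)
      · intro ha
        have : Bd.get? a ≠ none := by
          intro hn; exact (PySem.Dict.get?_eq_none_iff_not_mem_keys Bd a).mp hn ha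
        rw [hB_get a] at this
        have hne : pvValid a xs ≠ [] := fun hnil => this (by rw [hnil, pvRun_none_eq_none_iff])
        refine List.mem_filter.mpr ⟨?_, by
          cases e : pvValid a xs with
          | nil => exact absurd e hne
          | cons t ts => simp⟩
        rw [PySem.List.mem_sorted, hA_keys]
        have := pvValid_ne_nil_mem a xs hne
        simpa [PySem.Set.mem_ofList] using this
    · exact hSA_lt.filter _
  rw [hSB]
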